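-- pv_equiv track=rewrite | github.com/ravenn3105/LeetCode | 3973-flip-square-submatrix-vertically/flip-square-submatrix-vertically.py | reverseSubmatrix
-- ===== SOURCE A (Python) =====
-- def reverseSubmatrix(grid, x, y, k):
--     """
--     :type grid: List[List[int]]
--     :type x: int
--     :type y: int
--     :type k: int
--     :rtype: List[List[int]]
--     """
--     sub=[]
--     for q in range(x,x+k):
--         r= grid[q][y:y+k]
--         sub.append(r)
--     rev= sub[::-1]
--     for i in range(x,x+k):
--         grid[i][y:y+k]= rev[i-x]
--     return grid
-- ===== SOURCE B (Python) =====
-- def reverseSubmatrix(grid, x, y, k):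
--     # In-place two-pointer vertical flip: swap the k-length row slices
--     # symmetrically from the outside in; the middle row (odd k) stays put.
--     for i in range(k // 2):
--         grid[x + i][y:y + k], grid[x + k - 1 - i][y:y + k] = \
--             grid[x + k - 1 - i][y:y + k], grid[x + i][y:y + k]
--     return grid
-- ===== Notes on version B (the rewrite author's own statement) =====
-- stated objective: simpler
-- what changed: Replaces A's two full k-row passes (copy all k row slices into sub, reverse the copy, write all k slices back) with a single half-length in-place pass that swaps the two symmetric row slices by tuple assignment, building no auxiliary sub/rev lists and leaving the middle row untouched.
-- outside the precondition, e.g. on reverseSubmatrix([[1], [2]], -2, 0, 4): A returns [[2], [1]], B returns [[1], [2]]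
import Mathlib
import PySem

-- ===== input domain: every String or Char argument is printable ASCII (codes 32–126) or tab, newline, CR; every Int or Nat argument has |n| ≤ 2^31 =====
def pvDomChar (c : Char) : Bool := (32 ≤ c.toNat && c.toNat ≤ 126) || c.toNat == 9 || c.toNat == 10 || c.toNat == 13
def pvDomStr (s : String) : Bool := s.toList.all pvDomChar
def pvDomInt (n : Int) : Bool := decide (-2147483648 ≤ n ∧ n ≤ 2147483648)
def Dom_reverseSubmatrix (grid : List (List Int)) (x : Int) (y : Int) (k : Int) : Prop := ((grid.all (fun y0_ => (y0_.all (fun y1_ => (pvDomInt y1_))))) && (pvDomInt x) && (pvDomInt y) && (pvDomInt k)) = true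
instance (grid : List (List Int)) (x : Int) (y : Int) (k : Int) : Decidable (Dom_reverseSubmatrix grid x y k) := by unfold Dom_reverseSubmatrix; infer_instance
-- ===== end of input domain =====

-- B flips the k×k window in place with one half-length pass of symmetric slice swaps instead of
-- A's copy-all / reverse / write-all-back; both Pythons mutate grid's rows in place and return grid,
-- and the theorems below are about the returned value.

-- Hand port of Python's list slice assignment  row[a:b] = v  (step 1): exact — Python resolves both
-- bounds with slice clamping (negative means from the end, then clamp to [0, len]) and a stop below
-- the start acts as the start, i.e. the result is row[:start] ++ v ++ row[max(start,stop):].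
def pySetSlice (row : List Int) (a : Int) (b : Int) (v : List Int) : List Int :=
  let s := PySem.List.clampIdx row.length a
  let e := max s (PySem.List.clampIdx row.length b)
  row.take s ++ v ++ row.drop e

-- ===== PORT A =====
def reverseSubmatrix (grid : List (List Int)) (x : Int) (y : Int) (k : Int) : List (List Int) :=
  -- sub = []; for q in range(x, x+k): sub.append(grid[q][y:y+k])
  let sub := (PySem.List.pyRange x (x + k)).foldl
    (fun acc q => acc ++ [PySem.List.slice (PySem.List.pyGetD grid q []) (some y) (some (y + k))]) []
  -- rev = sub[::-1]
  let rev := (PySem.List.slice? sub none none (-1)).getD []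
  -- for i in range(x, x+k): grid[i][y:y+k] = rev[i-x]
  (PySem.List.pyRange x (x + k)).foldl
    (fun g i => PySem.List.pySetD g i
      (pySetSlice (PySem.List.pyGetD g i []) y (y + k) (PySem.List.pyGetD rev (i - x) []))) grid

-- ===== PORT B =====
def reverseSubmatrix_alt (grid : List (List Int)) (x : Int) (y : Int) (k : Int) : List (List Int) :=
  -- for i in range(k // 2):
  --   grid[x+i][y:y+k], grid[x+k-1-i][y:y+k] = grid[x+k-1-i][y:y+k], grid[x+i][y:y+k]
  (PySem.List.pyRange 0 (PySem.Int.floordiv k 2)).foldl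
    (fun g i =>
      -- right-hand tuple, snapshotted before any write
      let rhs1 := PySem.List.slice (PySem.List.pyGetD g (x + k - 1 - i) []) (some y) (some (y + k))
      let rhs2 := PySem.List.slice (PySem.List.pyGetD g (x + i) []) (some y) (some (y + k))
      -- targets assigned left to right
      let g1 := PySem.List.pySetD g (x + i)
        (pySetSlice (PySem.List.pyGetD g (x + i) []) y (y + k) rhs1)
      PySem.List.pySetD g1 (x + k - 1 - i)
        (pySetSlice (PySem.List.pyGetD g1 (x + k - 1 - i) []) y (y + k) rhs2)) grid

-- ===== PRECONDITION & SPEC =====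
-- Pre_ excludes calls with k > 0 whose row window [x, x+k) is not a plain in-range window
-- (x < 0 or x + k > len(grid)): there A either raises IndexError or returns a value only through
-- accidental negative-index wraparound, a corner on which A's snapshot-then-write and B's pairwise
-- swaps are equally accidental and can disagree once k exceeds the number of rows.
def Pre_reverseSubmatrix (grid : List (List Int)) (x : Int) (y : Int) (k : Int) : Prop :=
  k ≤ 0 ∨ (0 ≤ x ∧ x + k ≤ (grid.length : Int))
instance (grid : List (List Int)) (x : Int) (y : Int) (k : Int) : Decidable (Pre_reverseSubmatrix grid x y k) := by unfold Pre_reverseSubmatrix; infer_instance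

def pvWitness_reverseSubmatrix : List (List Int) × Int × Int × Int := ([[1, 2], [3, 4]], 0, 0, 2)

def Spec_reverseSubmatrix (grid : List (List Int)) (x : Int) (y : Int) (k : Int) (out : List (List Int)) : Prop := out = reverseSubmatrix_alt grid x y k
instance (grid : List (List Int)) (x : Int) (y : Int) (k : Int) (out : List (List Int)) : Decidable (Spec_reverseSubmatrix grid x y k out) := by unfold Spec_reverseSubmatrix; infer_instance

-- ===== CLAIM (what is proved, stated in full; the proofs are below) =====
def Claim_equal_reverseSubmatrix : Prop := ∀ (grid : List (List Int)) (x : Int) (y : Int) (k : Int), Dom_reverseSubmatrix grid x y k → Pre_reverseSubmatrix grid x y k → Spec_reverseSubmatrix grid x y k (reverseSubmatrix grid x y k)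

-- ===== LEMMAS AND PROOFS =====

-- f applied to a row r and the source row s: what one assignment  r[y:y+k] = s[y:y+k]  produces.
def rowF (y : Int) (k : Int) (r : List Int) (s : List Int) : List Int :=
  pySetSlice r y (y + k) (PySem.List.slice s (some y) (some (y + k)))

-- Writing a row's own slice back into it changes nothing.
theorem rowF_self (y k : Int) (r : List Int) : rowF y k r r = r := by
  simp only [rowF, pySetSlice]
  set s := PySem.List.clampIdx r.length y with hs
  set e := PySem.List.clampIdx r.length (y + k) with he
  simp only [PySem.List.slice, ← hs, ← he]
  have h1 : e - s = max s e - s := by omega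
  have h2 : s + (max s e - s) = max s e := by omega
  rw [h1, ← List.take_add, h2, List.take_append_drop]

-- getD through a single in-range set
theorem pvGetD_set {α : Type} (l : List α) (a i : Nat) (v d : α) (ha : a < l.length) :
    (l.set a v).getD i d = if a = i then v else l.getD i d := by
  simp [List.getD_eq_getElem?_getD, List.getElem?_set, ha]
  split <;> simp

-- one iteration of A's write-back loop, j-th of m, window starting at row n
def stepA (grid : List (List Int)) (y k : Int) (n m : Nat) (g : List (List Int)) (j : Nat) : List (List Int) :=
  g.set (n + j) (rowF y k (g.getD (n + j) []) (grid.getD (n + (m - 1 - j)) []))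

-- one iteration of B's swap loop
def stepB (y k : Int) (n m : Nat) (g : List (List Int)) (j : Nat) : List (List Int) :=
  let g1 := g.set (n + j) (rowF y k (g.getD (n + j) []) (g.getD (n + (m - 1 - j)) []))
  g1.set (n + (m - 1 - j)) (rowF y k (g1.getD (n + (m - 1 - j)) []) (g.getD (n + j) []))

theorem portA_eq_foldl (grid : List (List Int)) (y : Int) (n m : Nat) :
    reverseSubmatrix grid (n : Int) y (m : Int) =
      (List.range m).foldl (stepA grid y (m : Int) n m) grid := by
  have hr : PySem.List.pyRange (n : Int) ((n : Int) + (m : Int)) =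
      (List.range m).map (fun j => ((n + j : Nat) : Int)) := by
    rw [PySem.List.pyRange_one]
    simp
  simp only [reverseSubmatrix, hr, List.foldl_map,
    PySem.List.foldl_append_singleton_eq_map, List.nil_append,
    PySem.List.slice?_none_none_neg_one, Option.getD_some,
    PySem.List.pyGetD_natCast, PySem.List.pySetD_natCast]
  apply PySem.List.foldl_congr_mem
  intro g j hj
  have hjm : j < m := List.mem_range.mp hj
  have hidx : ((n + j : Nat) : Int) - (n : Int) = ((j : Nat) : Int) := by push_cast; ring
  rw [hidx, PySem.List.pyGetD_natCast]
  have hrevlen : j < ((List.range m).map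
      (fun j => PySem.List.slice (grid.getD (n + j) []) (some y) (some (y + (m : Int))))).reverse.length := by
    simpa using hjm
  rw [List.getD_eq_getElem _ [] hrevlen, List.getElem_reverse]
  simp only [List.length_map, List.length_range, List.getElem_map, List.getElem_range]
  simp [stepA, rowF]

theorem portB_eq_foldl (grid : List (List Int)) (y : Int) (n m : Nat) :
    reverseSubmatrix_alt grid (n : Int) y (m : Int) =
      (List.range (m / 2)).foldl (stepB y (m : Int) n m) grid := by
  have hfd : PySem.Int.floordiv (m : Int) 2 = ((m / 2 : Nat) : Int) := by
    exact_mod_cast PySem.Int.floordiv_natCast m 2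
  simp only [reverseSubmatrix_alt, hfd, PySem.List.pyRange_zero_nat, List.foldl_map]
  apply PySem.List.foldl_congr_mem
  intro g j hj
  have hjm : j < m / 2 := List.mem_range.mp hj
  have ha : (n : Int) + (j : Nat) = ((n + j : Nat) : Int) := by push_cast; ring
  have hb : (n : Int) + (m : Int) - 1 - (j : Nat) = ((n + (m - 1 - j) : Nat) : Int) := by omega
  rw [ha, hb]
  simp only [PySem.List.pyGetD_natCast, PySem.List.pySetD_natCast]
  simp [stepB, rowF]

theorem loopA_invariant (grid : List (List Int)) (y : Int) (n m : Nat)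
    (hlen : n + m ≤ grid.length) (t : Nat) (ht : t ≤ m) :
    ((List.range t).foldl (stepA grid y (m : Int) n m) grid).length = grid.length ∧
    ∀ i : Nat, ((List.range t).foldl (stepA grid y (m : Int) n m) grid).getD i [] =
      if n ≤ i ∧ i < n + t then rowF y (m : Int) (grid.getD i []) (grid.getD (2 * n + m - 1 - i) [])
      else grid.getD i [] := by
  induction t with
  | zero => exact ⟨rfl, fun i => (if_neg (by omega)).symm⟩
  | succ t ih =>
    obtain ⟨ihL, ihG⟩ := ih (by omega)
    set G := (List.range t).foldl (stepA grid y (m : Int) n m) grid with hGdef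
    rw [List.range_succ, List.foldl_append, List.foldl_cons, List.foldl_nil]
    have hGa : G.getD (n + t) [] = grid.getD (n + t) [] := by
      rw [ihG, if_neg (by omega)]
    refine ⟨by simp only [stepA, List.length_set]; exact ihL, fun i => ?_⟩
    simp only [stepA]
    rw [pvGetD_set _ _ _ _ _ (show n + t < G.length by rw [ihL]; omega), hGa]
    by_cases hia : n + t = i
    · subst hia
      rw [if_pos rfl, if_pos (by omega)]
      have h2 : 2 * n + m - 1 - (n + t) = n + (m - 1 - t) := by omega
      rw [h2]
    · rw [if_neg hia, ihG i]
      by_cases hp : n ≤ i ∧ i < n + t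
      · rw [if_pos hp, if_pos (by omega)]
      · rw [if_neg hp, if_neg (by omega)]

theorem loopB_invariant (grid : List (List Int)) (y : Int) (n m : Nat)
    (hlen : n + m ≤ grid.length) (t : Nat) (ht : t ≤ m / 2) :
    ((List.range t).foldl (stepB y (m : Int) n m) grid).length = grid.length ∧
    ∀ i : Nat, ((List.range t).foldl (stepB y (m : Int) n m) grid).getD i [] =
      if (n ≤ i ∧ i < n + t) ∨ (n + m - t ≤ i ∧ i < n + m) then
        rowF y (m : Int) (grid.getD i []) (grid.getD (2 * n + m - 1 - i) [])
      else grid.getD i [] := by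
  induction t with
  | zero => exact ⟨rfl, fun i => (if_neg (by omega)).symm⟩
  | succ t ih =>
    obtain ⟨ihL, ihG⟩ := ih (by omega)
    have hm2 : 2 * t + 2 ≤ m := by
      have := Nat.div_mul_le_self m 2
      omega
    set G := (List.range t).foldl (stepB y (m : Int) n m) grid with hGdef
    rw [List.range_succ, List.foldl_append, List.foldl_cons, List.foldl_nil]
    have hne : n + t ≠ n + (m - 1 - t) := by omega
    have hGa : G.getD (n + t) [] = grid.getD (n + t) [] := by
      rw [ihG, if_neg (by omega)]
    have hGb : G.getD (n + (m - 1 - t)) [] = grid.getD (n + (m - 1 - t)) [] := by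
      rw [ihG, if_neg (by omega)]
    refine ⟨by simp only [stepB, List.length_set]; exact ihL, fun i => ?_⟩
    simp only [stepB]
    have hg1b : (G.set (n + t) (rowF y (m : Int) (G.getD (n + t) []) (G.getD (n + (m - 1 - t)) []))).getD
        (n + (m - 1 - t)) [] = grid.getD (n + (m - 1 - t)) [] := by
      rw [pvGetD_set _ _ _ _ _ (show n + t < _ by rw [ihL]; omega), if_neg hne, hGb]
    rw [hg1b]
    rw [pvGetD_set _ _ _ _ _ (show n + (m - 1 - t) < _ by rw [List.length_set, ihL]; omega)]
    by_cases hib : n + (m - 1 - t) = i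
    · subst hib
      rw [if_pos rfl, hGa, if_pos (by omega)]
      have h2 : 2 * n + m - 1 - (n + (m - 1 - t)) = n + t := by omega
      rw [h2]
    · rw [if_neg hib]
      rw [pvGetD_set _ _ _ _ _ (show n + t < _ by rw [ihL]; omega), hGa, hGb]
      by_cases hia : n + t = i
      · subst hia
        rw [if_pos rfl, if_pos (by omega)]
        have h2 : 2 * n + m - 1 - (n + t) = n + (m - 1 - t) := by omega
        rw [h2]
      · rw [if_neg hia, ihG i]
        by_cases hp : (n ≤ i ∧ i < n + t) ∨ (n + m - t ≤ i ∧ i < n + m)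
        · rw [if_pos hp, if_pos (by omega)]
        · rw [if_neg hp, if_neg (by omega)]

-- ===== VERDICT (by name: the statement is the Claim_ definition above) =====
theorem reverseSubmatrix_spec : Claim_equal_reverseSubmatrix := by
  intro grid x y k _ hpre
  unfold Spec_reverseSubmatrix
  rcases lt_or_ge 0 k with hk | hk
  · -- k > 0, so Pre_ gives 0 ≤ x ∧ x + k ≤ len
    rcases hpre with hk0 | ⟨hx, hxk⟩
    · omega
    obtain ⟨n, rfl⟩ : ∃ n : Nat, x = (n : Int) := ⟨x.toNat, (Int.toNat_of_nonneg hx).symm⟩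
    obtain ⟨m, rfl⟩ : ∃ m : Nat, k = (m : Int) := ⟨k.toNat, (Int.toNat_of_nonneg (le_of_lt hk)).symm⟩
    have hm : 0 < m := by exact_mod_cast hk
    have hlen : n + m ≤ grid.length := by exact_mod_cast hxk
    rw [portA_eq_foldl grid y n m, portB_eq_foldl grid y n m]
    obtain ⟨hLa, hGa⟩ := loopA_invariant grid y n m hlen m le_rfl
    obtain ⟨hLb, hGb⟩ := loopB_invariant grid y n m hlen (m / 2) le_rfl
    apply List.ext_getElem (by omega)
    intro i h1 h2
    have hA := hGa i
    have hB := hGb i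
    rw [List.getD_eq_getElem _ [] h1] at hA
    rw [List.getD_eq_getElem _ [] h2] at hB
    rw [hA, hB]
    by_cases hin : n ≤ i ∧ i < n + m
    · by_cases hoff : (n ≤ i ∧ i < n + m / 2) ∨ (n + m - m / 2 ≤ i ∧ i < n + m)
      · rw [if_pos hin, if_pos hoff]
      · -- middle row of an odd window: i = n + m/2 and its partner is itself
        have hpart : 2 * n + m - 1 - i = i := by omega
        rw [if_pos hin, if_neg hoff, hpart, rowF_self]
    · have hoff : ¬ ((n ≤ i ∧ i < n + m / 2) ∨ (n + m - m / 2 ≤ i ∧ i < n + m)) := by omega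
      rw [if_neg hin, if_neg hoff]
  · -- k ≤ 0: both loops are empty and both return grid
    have hq : PySem.Int.floordiv k 2 < 1 :=
      (PySem.Int.floordiv_lt_iff_lt_mul (by norm_num)).mpr (by omega)
    rw [reverseSubmatrix, reverseSubmatrix_alt,
      PySem.List.pyRange_one_eq_nil (show x + k ≤ x by omega),
      PySem.List.pyRange_one_eq_nil (show PySem.Int.floordiv k 2 ≤ 0 by omega)]
    rfl
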